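-- pv_equiv track=rewrite | github.com/yuki9965/my-algorithm | 头条高频/84. 柱状图中最大的矩形.py | findToLeft
-- ===== SOURCE A (Python) =====
-- def findToLeft(heights):
--     left = [None for i in range(len(heights))]
--     stack = []
--
--     for i in range(len(heights)-1, -1, -1):
--         while stack and heights[stack[-1]] > heights[i]:
--             left[stack.pop()] = i + 1
--         stack.append(i)
--
--     while stack:
--         index = stack.pop()
--         left[index] = 0
--
--     return left
-- ===== SOURCE B (Python) =====
-- def findToLeft(heights):
--     left = []
--     stack = []
--     for i in range(len(heights)):
--         while stack and heights[stack[-1]] >= heights[i]: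
--             stack.pop()
--         left.append(stack[-1] + 1 if stack else 0)
--         stack.append(i)
--     return left
-- ===== Notes on version B (the rewrite author's own statement) =====
-- stated objective: alternative
-- what changed: B scans left-to-right and assigns each left[i] eagerly from the stack top (popping while heights[stack[-1]] >= heights[i], appending the answer as it goes), instead of A's right-to-left scan that assigns popped indices lazily and drains the stack with zeros at the end.
import Mathlib
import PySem

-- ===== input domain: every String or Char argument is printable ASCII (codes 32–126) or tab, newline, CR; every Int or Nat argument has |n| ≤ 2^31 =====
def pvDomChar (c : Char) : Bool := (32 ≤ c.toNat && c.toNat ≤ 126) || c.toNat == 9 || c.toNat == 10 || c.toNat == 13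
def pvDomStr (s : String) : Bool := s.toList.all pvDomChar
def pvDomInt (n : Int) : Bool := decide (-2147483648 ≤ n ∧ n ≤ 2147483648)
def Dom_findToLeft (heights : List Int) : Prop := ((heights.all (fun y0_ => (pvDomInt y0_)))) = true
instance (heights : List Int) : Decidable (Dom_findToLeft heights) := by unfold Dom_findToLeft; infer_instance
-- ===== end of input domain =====

-- B replaces A's right-to-left stack scan with lazy assignment of popped indices by a
-- left-to-right scan that assigns each left[i] eagerly from the stack top (alternative
-- decomposition, same cost). Equivalence of the RETURN values is proved below.

-- ===== PORT A =====
-- A's `left` starts as [None]*n; since every slot is overwritten before return, the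
-- placeholder is modelled by 0. All heights[...] index accesses are in range in Python,
-- so List.getD _ _ 0 is exact. stack[-1] is the head (stacks grow by prepending).
-- inner while loop: pop while heights[stack[-1]] > heights[i], assigning left[pop] = i+1
def popA (h : List Int) (hi : Int) (ip1 : Int) : List Int → List Nat → List Int × List Nat
  | left, [] => (left, [])
  | left, j :: rest =>
    if hi < h.getD j 0 then popA h hi ip1 (left.set j ip1) rest
    else (left, j :: rest)

-- for i in range(len(heights)-1, -1, -1): pop, then stack.append(i)
def loopA (h : List Int) : Nat → List Int → List Nat → List Int × List Nat
  | 0, left, stack => (left, stack)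
  | k + 1, left, stack =>
    let r := popA h (h.getD k 0) ((k : Int) + 1) left stack
    loopA h k r.1 (k :: r.2)

-- final while stack: left[stack.pop()] = 0
def drainA : List Nat → List Int → List Int
  | [], left => left
  | j :: rest, left => drainA rest (left.set j 0)

def findToLeft (heights : List Int) : List Int :=
  let r := loopA heights heights.length (List.replicate heights.length 0) []
  drainA r.2 r.1

-- ===== PORT B =====
-- stack[-1] + 1 if stack else 0
def topPlus1 : List Nat → Int
  | [] => 0
  | j :: _ => (j : Int) + 1

-- while stack and heights[stack[-1]] >= heights[i]: stack.pop()
def popB (h : List Int) (hi : Int) : List Nat → List Nat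
  | [] => []
  | j :: rest => if hi ≤ h.getD j 0 then popB h hi rest else j :: rest

-- for i in range(len(heights)): pop, append answer, push i
def loopB (h : List Int) : Nat → Nat → List Int → List Nat → List Int
  | 0, _, left, _ => left
  | fuel + 1, i, left, stack =>
    let stack' := popB h (h.getD i 0) stack
    loopB h fuel (i + 1) (left ++ [topPlus1 stack']) (i :: stack')

def findToLeft_alt (heights : List Int) : List Int :=
  loopB heights heights.length 0 [] []

-- ===== PRECONDITION & SPEC =====
def Spec_findToLeft (heights : List Int) (out : List Int) : Prop := out = findToLeft_alt heights
instance (heights : List Int) (out : List Int) : Decidable (Spec_findToLeft heights out) := by unfold Spec_findToLeft; infer_instance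

-- ===== CLAIM (what is proved, stated in full; the proofs are below) =====
def Claim_equal_findToLeft : Prop := ∀ (heights : List Int), Dom_findToLeft heights → Spec_findToLeft heights (findToLeft heights)

-- ===== LEMMAS AND PROOFS =====

-- the specification value: nearest j < i with h[j] < x, returned as j+1, else 0
def nsX (h : List Int) (x : Int) : Nat → Int
  | 0 => 0
  | j + 1 => if h.getD j 0 < x then (j : Int) + 1 else nsX h x j

-- "j survived all pops from indices ≥ k": no strictly smaller height in [k, j)
def SurvP (h : List Int) (k j : Nat) : Prop :=
  ∀ m, k ≤ m → m < j → ¬ h.getD m 0 < h.getD j 0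

lemma ns_found (h : List Int) (x : Int) (i : Nat) :
    ∀ j, i < j → h.getD i 0 < x → (∀ m, i < m → m < j → ¬ h.getD m 0 < x) →
    nsX h x j = (i : Int) + 1 := by
  intro j
  induction j with
  | zero => omega
  | succ t ih =>
    intro hij hi hmid
    by_cases ht : h.getD t 0 < x
    · have heq : i = t := by
        rcases Nat.lt_or_ge i t with h' | h'
        · exact absurd ht (hmid t h' (Nat.lt_succ_self t))
        · omega
      simp only [nsX, if_pos ht, heq]
    · have hit : i < t := by
        rcases Nat.lt_or_ge i t with h' | h'
        · exact h'
        · have : i = t := by omega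
          exact absurd (this ▸ hi) ht
      simp only [nsX, if_neg ht]
      exact ih hit hi (fun m hm1 hm2 => hmid m hm1 (Nat.lt_succ_of_lt hm2))

lemma ns_none (h : List Int) (x : Int) :
    ∀ j, (∀ m, m < j → ¬ h.getD m 0 < x) → nsX h x j = 0 := by
  intro j
  induction j with
  | zero => simp [nsX]
  | succ t ih =>
    intro hm
    simp only [nsX, if_neg (hm t (Nat.lt_succ_self t))]
    exact ih (fun m h' => hm m (Nat.lt_succ_of_lt h'))

lemma getD_set (l : List Int) (i : Nat) (v : Int) (j : Nat) :
    (l.set i v).getD j 0 = if i = j ∧ i < l.length then v else l.getD j 0 := by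
  simp only [List.getD, List.getElem?_set]
  by_cases hij : i = j
  · subst hij
    by_cases hlt : i < l.length
    · simp [hlt]
    · have hnone : l[i]? = none := by
        rw [List.getElem?_eq_none_iff]; omega
      simp [hlt, hnone]
  · simp [hij]

-- ---- B side ----

def stkB (h : List Int) : Nat → List Nat
  | 0 => []
  | i + 1 => i :: popB h (h.getD i 0) (stkB h i)

lemma popB_popB (h : List Int) (x y : Int) (hxy : x ≤ y) :
    ∀ s, popB h x (popB h y s) = popB h x s := by
  intro s
  induction s with
  | nil => rfl
  | cons j rest ih =>
    simp only [popB]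
    by_cases hyj : y ≤ h.getD j 0
    · have hxj : x ≤ h.getD j 0 := le_trans hxy hyj
      rw [if_pos hyj, if_pos hxj, ih]
    · rw [if_neg hyj]
      simp only [popB]

lemma topB (h : List Int) : ∀ (i : Nat) (x : Int),
    topPlus1 (popB h x (stkB h i)) = nsX h x i := by
  intro i
  induction i with
  | zero => intro x; rfl
  | succ t ih =>
    intro x
    by_cases hx : x ≤ h.getD t 0
    · have : ¬ h.getD t 0 < x := not_lt.mpr hx
      simp only [stkB, popB, if_pos hx, popB_popB h x (h.getD t 0) hx, nsX, if_neg this]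
      exact ih x
    · simp only [stkB, popB, if_neg hx, nsX, if_pos (not_le.mp hx), topPlus1]

lemma loopB_run (h : List Int) :
    ∀ (fuel i : Nat) (acc : List Int),
    loopB h fuel i acc (stkB h i) =
      acc ++ (List.range' i fuel).map (fun m => nsX h (h.getD m 0) m) := by
  intro fuel
  induction fuel with
  | zero => intro i acc; simp [loopB]
  | succ f ih =>
    intro i acc
    have hstk : (i :: popB h (h.getD i 0) (stkB h i)) = stkB h (i + 1) := rfl
    simp only [loopB, hstk, ih (i + 1) _, topB h i (h.getD i 0), List.range'_succ]
    simp

lemma alt_eq (h : List Int) :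
    findToLeft_alt h = (List.range h.length).map (fun m => nsX h (h.getD m 0) m) := by
  have : ([] : List Nat) = stkB h 0 := rfl
  simp only [findToLeft_alt, this, loopB_run h h.length 0 [], List.nil_append,
    List.range_eq_range']

-- ---- A side ----

lemma popA_lemma (h : List Int) (k L : Nat) :
    ∀ (stack : List Nat) (left : List Int),
    left.length = L →
    List.Pairwise (fun a b => h.getD b 0 ≤ h.getD a 0) stack →
    (∀ j ∈ stack, k < j ∧ j < L ∧ SurvP h (k + 1) j) →
    (∀ j, j < L → j ∉ stack → k + 1 ≤ j → left.getD j 0 = nsX h (h.getD j 0) j) →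
    (popA h (h.getD k 0) ((k : Int) + 1) left stack).1.length = L ∧
    List.Pairwise (fun a b => h.getD b 0 ≤ h.getD a 0) (popA h (h.getD k 0) ((k : Int) + 1) left stack).2 ∧
    (∀ j ∈ (popA h (h.getD k 0) ((k : Int) + 1) left stack).2,
        k < j ∧ j < L ∧ SurvP h (k + 1) j ∧ h.getD j 0 ≤ h.getD k 0) ∧
    (∀ j, j < L → j ∉ (popA h (h.getD k 0) ((k : Int) + 1) left stack).2 → k + 1 ≤ j →
        (popA h (h.getD k 0) ((k : Int) + 1) left stack).1.getD j 0 = nsX h (h.getD j 0) j) := by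
  intro stack
  induction stack with
  | nil =>
    intro left hlen _ _ hleft
    refine ⟨hlen, List.Pairwise.nil, by simp [popA], ?_⟩
    intro j hj hjn hkj
    exact hleft j hj (by simp) hkj
  | cons j rest ih =>
    intro left hlen hchain hmem hleft
    by_cases hpop : h.getD k 0 < h.getD j 0
    · -- j is popped and assigned k+1
      obtain ⟨hkj, hjL, hsurv⟩ := hmem j (by simp)
      have hval : nsX h (h.getD j 0) j = (k : Int) + 1 :=
        ns_found h (h.getD j 0) k j hkj hpop
          (fun m hm1 hm2 => hsurv m (by omega) hm2)
      have hstep : popA h (h.getD k 0) ((k : Int) + 1) left (j :: rest) =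
          popA h (h.getD k 0) ((k : Int) + 1) (left.set j ((k : Int) + 1)) rest := by
        simp only [popA]
        rw [if_pos hpop]
      rw [hstep]
      apply ih
      · simp [hlen]
      · exact hchain.tail  -- Pairwise.tail
      · intro j' hj'; exact hmem j' (by simp [hj'])
      · intro j' hj' hj'n hkj'
        rw [getD_set]
        by_cases hjj : j = j'
        · subst hjj
          rw [if_pos ⟨rfl, by omega⟩]
          exact hval.symm
        · rw [if_neg (by tauto)]
          exact hleft j' hj'
            (fun hc => (List.mem_cons.mp hc).elim (fun he => hjj he.symm) hj'n) hkj'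
    · -- pop stops
      have hstep : popA h (h.getD k 0) ((k : Int) + 1) left (j :: rest) = (left, j :: rest) := by
        simp only [popA]
        rw [if_neg hpop]
      rw [hstep]
      refine ⟨hlen, hchain, ?_, hleft⟩
      intro j' hj'
      obtain ⟨h1, h2, h3⟩ := hmem j' hj'
      rcases List.mem_cons.mp hj' with he | hm
      · exact ⟨h1, h2, h3, by rw [he]; exact not_lt.mp hpop⟩
      · exact ⟨h1, h2, h3,
          le_trans ((List.pairwise_cons.mp hchain).1 j' hm) (not_lt.mp hpop)⟩

lemma loopA_lemma (h : List Int) (L : Nat) :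
    ∀ (k : Nat) (left : List Int) (stack : List Nat),
    k ≤ L →
    left.length = L →
    List.Pairwise (fun a b => h.getD b 0 ≤ h.getD a 0) stack →
    (∀ j ∈ stack, k ≤ j ∧ j < L ∧ SurvP h k j) →
    (∀ j, j < L → j ∉ stack → k ≤ j → left.getD j 0 = nsX h (h.getD j 0) j) →
    (loopA h k left stack).1.length = L ∧
    (∀ j ∈ (loopA h k left stack).2, j < L ∧ SurvP h 0 j) ∧
    (∀ j, j < L → j ∉ (loopA h k left stack).2 →
        (loopA h k left stack).1.getD j 0 = nsX h (h.getD j 0) j) := by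
  intro k
  induction k with
  | zero =>
    intro left stack _ hlen _ hmem hleft
    refine ⟨hlen, ?_, ?_⟩
    · intro j hj; obtain ⟨_, h2, h3⟩ := hmem j hj; exact ⟨h2, h3⟩
    · intro j hj hjn; exact hleft j hj hjn (Nat.zero_le j)
  | succ k ih =>
    intro left stack hkL hlen hchain hmem hleft
    obtain ⟨p1, p2, p3, p4⟩ := popA_lemma h k L stack left hlen hchain
      (fun j hj => by obtain ⟨a, b, c⟩ := hmem j hj; exact ⟨by omega, b, c⟩)
      (fun j a b c => hleft j a b c)
    simp only [loopA]
    apply ih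
    · omega
    · exact p1
    · exact List.pairwise_cons.mpr ⟨fun j hj => (p3 j hj).2.2.2, p2⟩
    · intro j hj
      rcases List.mem_cons.mp hj with he | hm
      · subst he
        exact ⟨le_refl j, by omega, fun m hm1 hm2 _ => by omega⟩
      · obtain ⟨a, b, c, d⟩ := p3 j hm
        refine ⟨by omega, b, ?_⟩
        intro m hm1 hm2 hcon
        rcases Nat.eq_or_lt_of_le hm1 with he | hl
        · exact absurd hcon (he ▸ not_lt.mpr d)
        · exact c m hl hm2 hcon
    · intro j hj hjn hkj
      have hne : j ≠ k := fun he => hjn (by rw [he]; exact List.mem_cons_self ..)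
      exact p4 j hj (fun hc => hjn (List.mem_cons_of_mem _ hc)) (by omega)

lemma drain_lemma (h : List Int) (L : Nat) :
    ∀ (stack : List Nat) (left : List Int),
    left.length = L →
    (∀ j ∈ stack, j < L ∧ SurvP h 0 j) →
    (∀ j, j < L → j ∉ stack → left.getD j 0 = nsX h (h.getD j 0) j) →
    (drainA stack left).length = L ∧
    (∀ j, j < L → (drainA stack left).getD j 0 = nsX h (h.getD j 0) j) := by
  intro stack
  induction stack with
  | nil =>
    intro left hlen _ hleft
    exact ⟨hlen, fun j hj => hleft j hj (by simp)⟩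
  | cons j rest ih =>
    intro left hlen hmem hleft
    obtain ⟨hjL, hsurv⟩ := hmem j (by simp)
    have hval : nsX h (h.getD j 0) j = 0 :=
      ns_none h (h.getD j 0) j (fun m hm => hsurv m (Nat.zero_le m) hm)
    simp only [drainA]
    apply ih
    · simp [hlen]
    · intro j' hj'; exact hmem j' (by simp [hj'])
    · intro j' hj' hj'n
      rw [getD_set]
      by_cases hjj : j = j'
      · subst hjj
        rw [if_pos ⟨rfl, by omega⟩]
        exact hval.symm
      · rw [if_neg (by tauto)]
        exact hleft j' hj'
          (fun hc => (List.mem_cons.mp hc).elim (fun he => hjj he.symm) hj'n)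

lemma A_eq (h : List Int) :
    findToLeft h = (List.range h.length).map (fun m => nsX h (h.getD m 0) m) := by
  obtain ⟨l1, l2, l3⟩ := loopA_lemma h h.length h.length
    (List.replicate h.length 0) [] (le_refl _) (by simp) List.Pairwise.nil
    (by simp) (by intro j hj hjn hkj; omega)
  obtain ⟨d1, d2⟩ := drain_lemma h h.length
    (loopA h h.length (List.replicate h.length 0) []).2
    (loopA h h.length (List.replicate h.length 0) []).1 l1 l2 l3
  set F := drainA (loopA h h.length (List.replicate h.length 0) []).2
    (loopA h h.length (List.replicate h.length 0) []).1 with hF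
  have hFd : findToLeft h = F := rfl
  rw [hFd]
  apply List.ext_getElem
  · rw [d1]; simp
  · intro j hj1 hj2
    have hjL : j < h.length := by rw [d1] at hj1; exact hj1
    have h1 := d2 j hjL
    rw [List.getD_eq_getElem?_getD, List.getElem?_eq_getElem hj1, Option.getD_some] at h1
    rw [h1]
    simp

-- ===== VERDICT (by name: the statement is the Claim_ definition above) =====
theorem findToLeft_spec : Claim_equal_findToLeft := by
  intro heights _
  unfold Spec_findToLeft
  rw [A_eq, alt_eq]
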